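-- pv_equiv track=rewrite | github.com/wlilley93/datapipelines | connectors/intercom/schema_expand.py | sanitize_col
-- ===== SOURCE A (Python) =====
-- def sanitize_col(name: str) -> str:
--     out = []
--     for ch in str(name):
--         if ch.isalnum() or ch == "_":
--             out.append(ch.lower())
--         elif ch in (" ", "-", ".", ":", "/"):
--             out.append("_")
--     s = "".join(out).strip("_")
--     while "__" in s:
--         s = s.replace("__", "_")
--     return s or "field"
-- ===== SOURCE B (Python) =====
-- def sanitize_col(name: str) -> str:
--     # one-pass tokenizer: collect lowercase alnum runs, flush on separators/underscore,
--     # ignore other chars; join tokens with '_' (no strip/collapse post-passes needed)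
--     tokens = []
--     buf = []
--     for ch in str(name):
--         if ch.isalnum():
--             buf.append(ch.lower())
--         elif ch in (" ", "-", ".", ":", "/", "_"):
--             if buf:
--                 tokens.append("".join(buf))
--             buf = []
--     if buf:
--         tokens.append("".join(buf))
--     return "_".join(tokens) or "field"
-- ===== Notes on version B (the rewrite author's own statement) =====
-- stated objective: simpler
-- what changed: A builds a mapped character string and then post-processes it in extra passes (stripping edge underscores and repeatedly collapsing doubled underscores); B tokenizes the input in a single pass with a buffer flushed at separator characters and joins the nonempty tokens once, so no post-processing passes exist.
import Mathlib
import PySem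

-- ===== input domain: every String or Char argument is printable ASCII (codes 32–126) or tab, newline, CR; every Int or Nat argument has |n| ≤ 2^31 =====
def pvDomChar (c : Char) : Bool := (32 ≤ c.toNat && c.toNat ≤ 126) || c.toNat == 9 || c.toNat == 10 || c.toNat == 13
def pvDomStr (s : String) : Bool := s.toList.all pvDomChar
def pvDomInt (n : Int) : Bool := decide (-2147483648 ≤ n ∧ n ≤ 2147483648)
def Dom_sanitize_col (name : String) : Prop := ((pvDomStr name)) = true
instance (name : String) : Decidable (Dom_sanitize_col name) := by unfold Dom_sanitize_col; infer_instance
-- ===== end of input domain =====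

-- B replaces A's build-then-postprocess (strip('_') plus a '__'-collapsing while loop) by a
-- single-pass tokenizer (buffer flushed at separators), joining the tokens once at the end.

-- ===== PORT A =====
-- A-side helpers: rep1 characterizes one pass of s.replace("__", "_"); the lemmas about it
-- are cited by the port's decreasing_by (the while loop terminates because replace shrinks s)
def rep1 : List Char → List Char
  | '_' :: '_' :: t => '_' :: rep1 t
  | c :: t => c :: rep1 t
  | [] => []

theorem rep1_cons (c : Char) (t : List Char) (h : ¬(c = '_' ∧ t.head? = some '_')) :
    rep1 (c :: t) = c :: rep1 t := by
  rw [rep1.eq_def]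
  split
  · rename_i t' heq
    injection heq with h1 h2
    subst h1; subst h2
    exact absurd ⟨rfl, rfl⟩ h
  · rename_i c' t' heq
    injection heq with h1 h2
    subst h1; subst h2
    rfl
  · rename_i heq; cases heq

theorem rep1_cc (t : List Char) : rep1 ('_' :: '_' :: t) = '_' :: rep1 t := by
  simp [rep1]

theorem go_eq (fuel : Nat) : ∀ (l acc : List Char), l.length ≤ fuel →
    PySem.Chars.replace.go ['_','_'] ['_'] fuel l acc = acc.reverse ++ rep1 l := by
  induction fuel with
  | zero =>
    intro l acc h
    have : l = [] := by cases l <;> simp_all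
    subst this; simp [PySem.Chars.replace.go, rep1]
  | succ n ih =>
    intro l acc h
    match l with
    | [] => simp [PySem.Chars.replace.go, rep1]
    | c :: t =>
      rw [PySem.Chars.replace.go]
      by_cases hp : List.isPrefixOf ['_','_'] (c :: t) = true
      · obtain ⟨c2, t2, rfl⟩ : ∃ c2 t2, t = c2 :: t2 := by
          cases t with
          | nil => simp [List.isPrefixOf] at hp
          | cons a b => exact ⟨a, b, rfl⟩
        obtain ⟨hc1, hc2⟩ : '_' = c ∧ '_' = c2 := by simpa [List.isPrefixOf] using hp
        subst hc1; subst hc2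
        rw [if_pos hp, ih]
        · simp [rep1_cc]
        · simp at h ⊢; omega
      · rw [if_neg (by simpa using hp), ih _ _ (by simp at h ⊢; omega)]
        rw [rep1_cons]
        · simp
        · rintro ⟨rfl, hh⟩
          cases t with
          | nil => simp at hh
          | cons a b =>
            simp at hh
            exact hp (by simp [List.isPrefixOf, hh])

theorem rep1_eq_replace (s : List Char) :
    PySem.Chars.replace s ['_', '_'] ['_'] = rep1 s := by
  rw [PySem.Chars.replace, if_neg (by simp)]
  exact go_eq s.length s [] le_rfl

theorem rep1_length_le (s : List Char) : (rep1 s).length ≤ s.length := by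
  induction s using rep1.induct with
  | case1 t ih => rw [rep1_cc]; simp at ih ⊢; omega
  | case2 c t h ih =>
    rw [rep1_cons c t ?_]
    · simpa using ih
    · rintro ⟨rfl, hh⟩
      cases t with
      | nil => simp at hh
      | cons a b => simp at hh; exact h b rfl (by rw [hh])
  | case3 => simp [rep1]

theorem rep1_length_lt (s : List Char) (h : ['_', '_'] <:+: s) :
    (rep1 s).length < s.length := by
  induction s using rep1.induct with
  | case1 t _ =>
    rw [rep1_cc]
    have := rep1_length_le t
    simp; omega
  | case2 c t hne ih =>
    rw [rep1_cons c t ?_]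
    · have hin : ['_','_'] <:+: t := by
        rcases (List.infix_cons_iff.mp h) with hpre | hinf
        · exfalso
          rcases hpre with ⟨r, hr⟩
          simp at hr
          obtain ⟨h1, h2⟩ := hr
          exact hne r h1.symm h2.symm
        · exact hinf
      simpa using ih hin
    · rintro ⟨rfl, hh⟩
      cases t with
      | nil => simp at hh
      | cons a b => simp at hh; exact hne b rfl (by rw [hh])
  | case3 => simp at h


-- while "__" in s: s = s.replace("__", "_")
def collapseA (s : List Char) : List Char :=
  if h : PySem.Chars.isIn ['_', '_'] s = true then
    collapseA (PySem.Chars.replace s ['_', '_'] ['_'])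
  else s
termination_by s.length
decreasing_by
  rw [rep1_eq_replace]
  exact rep1_length_lt s ((PySem.Chars.isIn_iff_infix _ _).mp h)

def sanitize_col (name : String) : String :=
  let out : List Char := name.toList.foldl (fun acc ch =>
    if PySem.Chars.isalnum ch || ch == '_' then acc ++ [PySem.Chars.lowerChar ch]
    else if ch == ' ' || ch == '-' || ch == '.' || ch == ':' || ch == '/' then acc ++ ['_']
    else acc) []
  let s := PySem.Chars.stripChars out ['_']
  let s := collapseA s
  if s = [] then "field" else String.ofList s

-- ===== PORT B =====

def sanitize_col_alt (name : String) : String :=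
  let st : List (List Char) × List Char := name.toList.foldl (fun st ch =>
    if PySem.Chars.isalnum ch then (st.1, st.2 ++ [PySem.Chars.lowerChar ch])
    else if ch == ' ' || ch == '-' || ch == '.' || ch == ':' || ch == '/' || ch == '_' then
      ((if st.2 = [] then st.1 else st.1 ++ [st.2]), ([] : List Char))
    else st) ([], [])
  let toks := if st.2 = [] then st.1 else st.1 ++ [st.2]
  let j := PySem.Chars.join ['_'] toks
  if j = [] then "field" else String.ofList j

-- ===== PRECONDITION & SPEC =====
def Spec_sanitize_col (name : String) (out : String) : Prop := out = sanitize_col_alt name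
instance (name : String) (out : String) : Decidable (Spec_sanitize_col name out) := by unfold Spec_sanitize_col; infer_instance

-- ===== CLAIM (what is proved, stated in full; the proofs are below) =====
def Claim_equal_sanitize_col : Prop := ∀ (name : String), Dom_sanitize_col name → Spec_sanitize_col name (sanitize_col name)

-- ===== LEMMAS AND PROOFS =====

def uP (c : Char) : Bool := c == '_'

theorem uP_true : uP '_' = true := by decide

theorem uP_false {c : Char} (hc : c ≠ '_') : uP c = false := by
  rw [uP, Bool.eq_false_iff]
  simpa using hc

def squeeze : List Char → List Char
  | '_' :: '_' :: t => squeeze ('_' :: t)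
  | c :: t => c :: squeeze t
  | [] => []

theorem squeeze_cons (a : Char) (t : List Char) (h : ¬(a = '_' ∧ t.head? = some '_')) :
    squeeze (a :: t) = a :: squeeze t := by
  rw [squeeze.eq_def]
  split
  · rename_i t' heq
    injection heq with h1 h2
    subst h1; subst h2
    exact absurd ⟨rfl, rfl⟩ h
  · rename_i c' t' heq
    injection heq with h1 h2
    subst h1; subst h2
    rfl
  · rename_i heq; cases heq

theorem squeeze_cc (t : List Char) : squeeze ('_' :: '_' :: t) = squeeze ('_' :: t) := by
  simp [squeeze]

theorem squeeze_underscore (x : List Char) :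
    squeeze ('_' :: x) = '_' :: squeeze (List.dropWhile uP x) := by
  induction x with
  | nil => simp [squeeze, List.dropWhile]
  | cons c y ih =>
    by_cases hc : c = '_'
    · subst hc
      rw [squeeze_cc, ih]
      simp [List.dropWhile, uP_true]
    · rw [squeeze_cons _ _ (by simp [hc]), List.dropWhile_cons_of_neg (by simp [uP_false hc])]

theorem squeeze_append_left (xs ys : List Char) (h : ∀ x ∈ xs, x ≠ '_') :
    squeeze (xs ++ ys) = xs ++ squeeze ys := by
  induction xs with
  | nil => rfl
  | cons a t ih =>
    have ha : a ≠ '_' := h a (by simp)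
    rw [List.cons_append, squeeze_cons _ _ (by simp [ha]), ih (fun x hx => h x (by simp [hx]))]
    simp

theorem squeeze_no_underscore (s : List Char) (h : ∀ x ∈ s, x ≠ '_') : squeeze s = s := by
  have := squeeze_append_left s [] h
  simpa [squeeze] using this

theorem squeeze_of_no_infix (s : List Char) (h : ¬ ['_', '_'] <:+: s) : squeeze s = s := by
  induction s using squeeze.induct with
  | case1 t _ => exact absurd (List.IsInfix.trans ⟨[], t, rfl⟩ (List.infix_refl _)) h
  | case2 c t hne ih =>
    rw [squeeze_cons c t ?_]
    · rw [ih (fun hin => h (hin.trans (List.suffix_cons c t).isInfix))]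
    · rintro ⟨rfl, hh⟩
      cases t with
      | nil => simp at hh
      | cons a b => simp at hh; exact hne b rfl (by rw [hh])
  | case3 => rfl

def rstripU (s : List Char) : List Char :=
  (List.dropWhile uP s.reverse).reverse

theorem stripChars_eq (s : List Char) :
    PySem.Chars.stripChars s ['_'] = rstripU (List.dropWhile uP s) := by
  rw [PySem.Chars.stripChars, rstripU]
  have hfun : (fun c => ['_'].contains c) = uP := by
    funext c; rw [uP]; rw [Bool.eq_iff_iff]; simp
  rw [hfun]

theorem rstripU_cons (c : Char) (t : List Char) :
    rstripU (c :: t) =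
      if rstripU t = [] then (if c = '_' then [] else [c]) else c :: rstripU t := by
  rw [rstripU, rstripU, List.reverse_cons, List.dropWhile_append]
  by_cases h : List.dropWhile uP t.reverse = []
  · simp [h, List.dropWhile, uP]
    split <;> simp_all
  · simp [h]

theorem rstripU_eq_nil_iff (t : List Char) : rstripU t = [] ↔ ∀ c ∈ t, c = '_' := by
  induction t with
  | nil => simp [rstripU]
  | cons c t ih =>
    rw [rstripU_cons]
    by_cases h : rstripU t = []
    · rw [if_pos h]
      by_cases hc : c = '_'
      · simp only [if_pos hc, true_iff]
        intro x hx
        rcases List.mem_cons.mp hx with rfl | hx'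
        · exact hc
        · exact ih.mp h x hx'
      · simp only [if_neg hc]
        simp only [List.cons_ne_nil, false_iff]
        intro hall
        exact hc (hall c (by simp))
    · rw [if_neg h]
      simp only [List.cons_ne_nil, false_iff]
      intro hall
      exact h (ih.mpr fun x hx => hall x (by simp [hx]))

theorem dropWhile_rep1 (x : List Char) :
    List.dropWhile uP (rep1 x) = rep1 (List.dropWhile uP x) := by
  induction x using rep1.induct with
  | case1 t ih =>
    rw [rep1_cc]
    simp only [List.dropWhile_cons_of_pos uP_true]
    rw [ih]
  | case2 c t hne ih =>
    have hcons : rep1 (c :: t) = c :: rep1 t := by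
      apply rep1_cons
      rintro ⟨rfl, hh⟩
      cases t with
      | nil => simp at hh
      | cons a b => simp at hh; exact hne b rfl (by rw [hh])
    rw [hcons]
    by_cases hc : c = '_'
    · subst hc
      simp only [List.dropWhile_cons_of_pos uP_true]
      exact ih
    · have hneg : ¬ uP c = true := by simp [uP_false hc]
      rw [List.dropWhile_cons_of_neg hneg, List.dropWhile_cons_of_neg hneg]
      exact hcons.symm
  | case3 => rfl

theorem squeeze_rep1 (s : List Char) : squeeze (rep1 s) = squeeze s := by
  induction hn : s.length using Nat.strong_induction_on generalizing s with
  | _ n ih =>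
  subst hn
  match s with
  | [] => rfl
  | c :: t =>
    by_cases hc : c = '_'
    · subst hc
      cases t with
      | nil => rfl
      | cons a b =>
        by_cases ha : a = '_'
        · subst ha
          rw [rep1_cc, squeeze_underscore, squeeze_cc, squeeze_underscore,
              dropWhile_rep1]
          congr 1
          · have hlen := List.length_dropWhile_le uP b
            exact ih _ (by simp only [List.length_cons]; omega) _ rfl
        · rw [rep1_cons _ _ (by simp [ha]), squeeze_underscore, squeeze_underscore, dropWhile_rep1]
          have hdw : List.dropWhile uP (a :: b) = a :: b :=
            List.dropWhile_cons_of_neg (by simp [uP_false ha])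

          rw [hdw]
          congr 1
          exact ih _ (by simp) _ rfl
    · rw [rep1_cons _ _ (by simp [hc])]
      rw [squeeze_cons _ _ (by simp [hc]), squeeze_cons _ _ (by simp [hc])]
      congr 1
      exact ih _ (by simp) _ rfl

theorem collapseA_eq_squeeze (s : List Char) : collapseA s = squeeze s := by
  induction hn : s.length using Nat.strong_induction_on generalizing s with
  | _ n ih =>
  subst hn
  rw [collapseA]
  by_cases h : PySem.Chars.isIn ['_', '_'] s = true
  · rw [dif_pos h, rep1_eq_replace]
    have hlt := rep1_length_lt s ((PySem.Chars.isIn_iff_infix _ _).mp h)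
    rw [ih _ hlt _ rfl, squeeze_rep1]
  · rw [dif_neg h]
    exact (squeeze_of_no_infix s (PySem.Chars.isIn_eq_false_iff _ _ |>.mp (by simpa using h))).symm

def toks : List Char → List (List Char)
  | [] => []
  | c :: t =>
    if c = '_' then toks t
    else (c :: t.takeWhile (· ≠ '_')) :: toks (t.dropWhile (· ≠ '_'))
termination_by t => t.length
decreasing_by
  · simp
  · exact Nat.lt_succ_of_le (List.length_dropWhile_le _ _)

theorem toks_eq_nil_iff (t : List Char) : toks t = [] ↔ ∀ c ∈ t, c = '_' := by
  induction hn : t.length using Nat.strong_induction_on generalizing t with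
  | _ n ih =>
  subst hn
  match t with
  | [] => simp [toks]
  | c :: t =>
    rw [toks]
    by_cases hc : c = '_'
    · rw [if_pos hc]
      rw [ih _ (by simp) _ rfl]
      subst hc
      simp
    · rw [if_neg hc]
      simp only [List.cons_ne_nil, false_iff]
      intro hall
      exact hc (hall c (by simp))

theorem dropWhile_rstripU (r : List Char) (h : rstripU r ≠ []) :
    List.dropWhile uP (rstripU r) = rstripU (List.dropWhile uP r) := by
  induction r with
  | nil => simp [rstripU] at h ⊢
  | cons c x ih =>
    by_cases hc : c = '_'
    · subst hc
      rw [rstripU_cons] at h ⊢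
      by_cases hx : rstripU x = []
      · simp [hx] at h
      · rw [if_neg hx] at h ⊢
        rw [List.dropWhile_cons_of_pos uP_true, ih hx,
            List.dropWhile_cons_of_pos uP_true]
    · have hdw : List.dropWhile uP (c :: x) = c :: x :=
        List.dropWhile_cons_of_neg (by simp [uP_false hc])
      rw [rstripU_cons, hdw, rstripU_cons]
      by_cases hx : rstripU x = []
      · rw [if_pos hx, if_neg hc]
        exact List.dropWhile_cons_of_neg (by simp [uP_false hc])
      · rw [if_neg hx]
        exact List.dropWhile_cons_of_neg (by simp [uP_false hc])

theorem intercalate_cons_of_ne_nil (a : List Char) (rest : List (List Char)) (h : rest ≠ []) :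
    List.intercalate ['_'] (a :: rest) = a ++ '_' :: List.intercalate ['_'] rest := by
  match rest with
  | [] => exact absurd rfl h
  | b :: r => simp [List.intercalate]

theorem rstripU_append_left (xs r : List Char) (hxs : ∀ x ∈ xs, x ≠ '_') :
    rstripU (xs ++ r) = if rstripU r = [] then xs else xs ++ rstripU r := by
  induction xs with
  | nil => simp
  | cons a t ih =>
    have ha : a ≠ '_' := hxs a (by simp)
    rw [List.cons_append, rstripU_cons, ih (fun x hx => hxs x (by simp [hx]))]
    by_cases hr : rstripU r = []
    · rw [if_pos hr, if_pos hr]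
      by_cases ht : t = []
      · subst ht; simp [ha]
      · rw [if_neg ht]
    · have hne : t ++ rstripU r ≠ [] := by simp [hr]
      rw [if_neg hr, if_neg hr, if_neg hne]
      simp
    
theorem dropWhile_ne_head (t : List Char) (a : Char) (u : List Char)
    (h : List.dropWhile (fun x => decide (x ≠ '_')) t = a :: u) : a = '_' := by
  induction t with
  | nil => simp at h
  | cons c x ih =>
    by_cases hc : c = '_'
    · rw [List.dropWhile_cons_of_neg (by simp [hc])] at h
      injection h with h1 _
      rw [← h1, hc]
    · rw [List.dropWhile_cons_of_pos (by simp [hc])] at h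
      exact ih h

-- the key structural lemma
theorem core (t : List Char) :
    squeeze (rstripU (List.dropWhile uP t)) = List.intercalate ['_'] (toks t) := by
  induction hn : t.length using Nat.strong_induction_on generalizing t with
  | _ n ih =>
  subst hn
  match t with
  | [] => simp [rstripU, toks, List.intercalate, squeeze]
  | c :: t =>
    by_cases hc : c = '_'
    · subst hc
      rw [List.dropWhile_cons_of_pos uP_true, toks, if_pos rfl]
      exact ih _ (by simp) _ rfl
    · rw [List.dropWhile_cons_of_neg (by simp [uP_false hc]), toks, if_neg hc]
      set w := t.takeWhile (· ≠ '_') with hw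
      set r := t.dropWhile (· ≠ '_') with hr
      have htw : t = w ++ r := (List.takeWhile_append_dropWhile).symm
      have hwno : ∀ x ∈ (c :: w), x ≠ '_' := by
        intro x hx
        rcases List.mem_cons.mp hx with rfl | hx'
        · exact hc
        · have := List.mem_takeWhile_imp (hw ▸ hx')
          simpa using this
      by_cases hrall : rstripU r = []
      · -- r is all underscores: strip drops it entirely
        have htoks : toks r = [] := (toks_eq_nil_iff r).mpr ((rstripU_eq_nil_iff r).mp hrall)
        have : rstripU (c :: t) = c :: w := by
          rw [htw, ← List.cons_append, rstripU_append_left _ _ hwno, if_pos hrall]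
        rw [this, htoks, squeeze_no_underscore _ hwno]
        simp [List.intercalate]
      · -- r contains a run: it starts with '_' and carries more tokens
        have hrne : r ≠ [] := by
          intro h0
          rw [h0] at hrall
          simp [rstripU] at hrall
        obtain ⟨r', hr'⟩ : ∃ r', r = '_' :: r' := by
          cases hrx : r with
          | nil => exact absurd hrx hrne
          | cons a u =>
            have ha : a = '_' := dropWhile_ne_head t a u (hr ▸ hrx)
            exact ⟨u, by rw [ha]⟩
        have hstrip : rstripU (c :: t) = (c :: w) ++ rstripU r := by
          rw [htw, ← List.cons_append, rstripU_append_left _ _ hwno, if_neg hrall]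
        rw [hstrip, squeeze_append_left _ _ hwno]
        -- rstripU r = '_' :: rstripU r'
        have hrr : rstripU r = '_' :: rstripU r' := by
          rw [hr', rstripU_cons] at hrall ⊢
          by_cases hx : rstripU r' = []
          · simp [hx] at hrall
          · rw [if_neg hx]
        have hr'ne : rstripU r' ≠ [] := by
          intro hx
          apply hrall
          rw [hr', rstripU_cons, if_pos hx, if_pos rfl]
        rw [hrr, squeeze_underscore, dropWhile_rstripU r' hr'ne]
        have hlen : r'.length < (c :: t).length := by
          have h2 : r.length ≤ t.length := by
            rw [hr]; exact List.length_dropWhile_le _ _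
          rw [hr'] at h2
          simp only [List.length_cons] at h2 ⊢
          omega
        have hcore := ih r'.length hlen r' rfl
        rw [hcore]
        have htoksr : toks r = toks r' := by rw [hr', toks, if_pos rfl]
        have htoksne : toks r' ≠ [] := by
          intro hx
          exact hr'ne ((rstripU_eq_nil_iff r').mpr ((toks_eq_nil_iff r').mp hx))
        rw [htoksr, intercalate_cons_of_ne_nil _ _ htoksne]

theorem upper_shift (c : Char) (h1 : 'A' ≤ c) (h2 : c ≤ 'Z') :
    Char.ofNat (c.toNat + 32) ≠ '_' := by
  rw [Char.le_def] at h1 h2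
  have h4 : 65 ≤ c.toNat := by
    have := UInt32.le_iff_toNat_le.mp h1
    simpa [Char.toNat_val] using this
  have h5 : c.toNat ≤ 90 := by
    have := UInt32.le_iff_toNat_le.mp h2
    simpa [Char.toNat_val] using this
  intro heq
  have h3 := congrArg Char.toNat heq
  rw [Char.toNat_ofNat, if_pos (Or.inl (by omega))] at h3
  rw [show Char.toNat '_' = 95 from by decide] at h3
  omega

theorem lowerChar_ne_underscore (c : Char) (h : PySem.Chars.isalnum c = true) :
    PySem.Chars.lowerChar c ≠ '_' := by
  rw [PySem.Chars.lowerChar]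
  by_cases hu : PySem.Chars.isupper c = true
  · rw [if_pos hu]
    rw [PySem.Chars.isupper] at hu
    simp only [Bool.and_eq_true, decide_eq_true_eq] at hu
    exact upper_shift c hu.1 hu.2
  · rw [if_neg hu]
    intro heq
    subst heq
    simp [PySem.Chars.isalnum, PySem.Chars.isalpha, PySem.Chars.isdigit,
      PySem.Chars.isupper, PySem.Chars.islower] at h

def gcls (c : Char) : List Char :=
  if PySem.Chars.isalnum c then [PySem.Chars.lowerChar c]
  else if c = '_' ∨ c = ' ' ∨ c = '-' ∨ c = '.' ∨ c = ':' ∨ c = '/' then ['_']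
  else []

def tokStep (st : List (List Char) × List Char) (c : Char) : List (List Char) × List Char :=
  if c = '_' then ((if st.2 = [] then st.1 else st.1 ++ [st.2]), [])
  else (st.1, st.2 ++ [c])

-- A's loop body appends exactly the classification of the character
theorem stepA_eq :
    (fun (acc : List Char) ch =>
      if PySem.Chars.isalnum ch || ch == '_' then acc ++ [PySem.Chars.lowerChar ch]
      else if ch == ' ' || ch == '-' || ch == '.' || ch == ':' || ch == '/' then acc ++ ['_']
      else acc) = fun acc ch => acc ++ gcls ch := by
  funext acc ch
  rw [gcls]
  by_cases ha : PySem.Chars.isalnum ch = true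
  · simp [ha]
  · have hb1 : (PySem.Chars.isalnum ch || ch == '_') = (ch == '_') := by simp [ha]
    rw [hb1, if_neg ha]
    by_cases hu : ch = '_'
    · subst hu
      rw [if_pos (Or.inl rfl), if_pos (by rfl),
          show PySem.Chars.lowerChar '_' = '_' from by decide]
    · rw [if_neg (by simpa using hu)]
      by_cases hs : ch = ' ' ∨ ch = '-' ∨ ch = '.' ∨ ch = ':' ∨ ch = '/'
      · rw [if_pos (by rcases hs with h|h|h|h|h <;> simp [h]), if_pos (Or.inr hs)]
      · push_neg at hs
        rw [if_neg (by simp [hs.1, hs.2.1, hs.2.2.1, hs.2.2.2.1, hs.2.2.2.2]),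
            if_neg (by rintro (h|h|h|h|h|h)
                       exacts [hu h, hs.1 h, hs.2.1 h, hs.2.2.1 h, hs.2.2.2.1 h, hs.2.2.2.2 h])]
        simp

-- B's loop body is the tokenizer step applied to the character's classification
theorem stepB_eq (st : List (List Char) × List Char) (ch : Char) :
    (if PySem.Chars.isalnum ch then (st.1, st.2 ++ [PySem.Chars.lowerChar ch])
     else if ch == ' ' || ch == '-' || ch == '.' || ch == ':' || ch == '/' || ch == '_' then
       ((if st.2 = [] then st.1 else st.1 ++ [st.2]), ([] : List Char))
     else st) = List.foldl tokStep st (gcls ch) := by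
  rw [gcls]
  by_cases ha : PySem.Chars.isalnum ch = true
  · rw [if_pos ha, if_pos ha]
    simp only [List.foldl_cons, List.foldl_nil]
    rw [tokStep, if_neg (lowerChar_ne_underscore ch ha)]
  · rw [if_neg ha, if_neg ha]
    by_cases hs : ch = '_' ∨ ch = ' ' ∨ ch = '-' ∨ ch = '.' ∨ ch = ':' ∨ ch = '/'
    · rw [if_pos (by rcases hs with h|h|h|h|h|h <;> simp [h]), if_pos hs]
      simp only [List.foldl_cons, List.foldl_nil]
      rw [tokStep, if_pos rfl]
    · push_neg at hs
      rw [if_neg (by simp [hs.1, hs.2.1, hs.2.2.1, hs.2.2.2.1, hs.2.2.2.2.1, hs.2.2.2.2.2]),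
          if_neg (by rintro (h|h|h|h|h|h)
                     exacts [hs.1 h, hs.2.1 h, hs.2.2.1 h, hs.2.2.2.1 h, hs.2.2.2.2.1 h,
                       hs.2.2.2.2.2 h])]
      simp

theorem bfold_eq (cs : List Char) (st : List (List Char) × List Char) :
    List.foldl (fun st ch =>
      if PySem.Chars.isalnum ch then (st.1, st.2 ++ [PySem.Chars.lowerChar ch])
      else if ch == ' ' || ch == '-' || ch == '.' || ch == ':' || ch == '/' || ch == '_' then
        ((if st.2 = [] then st.1 else st.1 ++ [st.2]), ([] : List Char))
      else st) st cs = List.foldl tokStep st (cs.flatMap gcls) := by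
  induction cs generalizing st with
  | nil => rfl
  | cons c cs ih =>
    rw [List.foldl_cons, ih, List.flatMap_cons, List.foldl_append, stepB_eq]

def tokAux (buf : List Char) : List Char → List (List Char)
  | [] => if buf = [] then [] else [buf]
  | c :: t =>
    if c = '_' then ((if buf = [] then [] else [buf]) ++ tokAux [] t)
    else tokAux (buf ++ [c]) t

theorem tokfold_eq (t : List Char) : ∀ (acc : List (List Char)) (buf : List Char),
    (fun st : List (List Char) × List Char =>
      if st.2 = [] then st.1 else st.1 ++ [st.2]) (List.foldl tokStep (acc, buf) t)
      = acc ++ tokAux buf t := by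
  induction t with
  | nil =>
    intro acc buf
    rw [tokAux]
    by_cases hb : buf = [] <;> simp [hb]
  | cons c t ih =>
    intro acc buf
    rw [List.foldl_cons, tokStep, tokAux]
    by_cases hc : c = '_'
    · rw [if_pos hc, if_pos hc]
      by_cases hb : buf = []
      · rw [if_pos hb, if_pos hb, ih]
        simp
      · rw [if_neg hb, if_neg hb, ih]
        simp
    · rw [if_neg hc, if_neg hc, ih]

theorem tokAux_eq_toks (buf : List Char) (t : List Char) (h : ∀ x ∈ buf, x ≠ '_') :
    tokAux buf t =
      if buf = [] then toks t
      else (buf ++ t.takeWhile (· ≠ '_')) :: toks (t.dropWhile (· ≠ '_')) := by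
  induction t generalizing buf with
  | nil =>
    rw [tokAux]
    by_cases hb : buf = []
    · simp [hb, toks]
    · simp [hb, toks]
  | cons c t ih =>
    rw [tokAux]
    by_cases hc : c = '_'
    · rw [if_pos hc, ih [] (by simp), if_pos rfl]
      subst hc
      by_cases hb : buf = []
      · rw [if_pos hb, if_pos hb, toks, if_pos rfl]
        simp
      · rw [if_neg hb, if_neg hb]
        rw [List.takeWhile_cons_of_neg (by simp), List.dropWhile_cons_of_neg (by simp)]
        simp only [List.append_nil, List.singleton_append]
        congr 1
        rw [toks, if_pos rfl]
    · rw [if_neg hc, ih (buf ++ [c]) ?hbc]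
      case hbc =>
        intro x hx
        rcases List.mem_append.mp hx with hx' | hx'
        · exact h x hx'
        · simp at hx'; subst hx'; exact hc
      rw [if_neg (by simp)]
      by_cases hb : buf = []
      · rw [if_pos hb, toks, if_neg hc]
        subst hb
        simp
      · rw [if_neg hb]
        rw [List.takeWhile_cons_of_pos (by simp [hc]), List.dropWhile_cons_of_pos (by simp [hc])]
        simp

-- intercalate of underscore-free tokens as PySem join
theorem join_eq_intercalate (parts : List (List Char)) :
    PySem.Chars.join ['_'] parts = List.intercalate ['_'] parts := by
  rw [PySem.Chars.join, List.intercalate]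

theorem tokfold_eq' (t : List Char) (acc : List (List Char)) (buf : List Char) :
    (if (List.foldl tokStep (acc, buf) t).2 = [] then (List.foldl tokStep (acc, buf) t).1
     else (List.foldl tokStep (acc, buf) t).1 ++ [(List.foldl tokStep (acc, buf) t).2])
      = acc ++ tokAux buf t := tokfold_eq t acc buf


theorem ports_agree (name : String) : sanitize_col name = sanitize_col_alt name := by
  rw [sanitize_col, sanitize_col_alt]
  rw [stepA_eq, PySem.List.foldl_append_eq_flatMap, bfold_eq, tokfold_eq']
  rw [tokAux_eq_toks [] _ (by simp), if_pos rfl]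
  rw [List.nil_append, List.nil_append, stripChars_eq, collapseA_eq_squeeze, core,
      join_eq_intercalate]

-- ===== VERDICT (by name: the statement is the Claim_ definition above) =====
theorem sanitize_col_spec : Claim_equal_sanitize_col := by
  intro name _
  unfold Spec_sanitize_col
  exact ports_agree name
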